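-- pv_equiv track=rewrite | github.com/tkkuehn/aoc19 | day4/part1.py | meets_criteria
-- ===== SOURCE A (Python) =====
-- def meets_criteria(num, min_, max_):
--     if num < min_:
--         return False
--
--     if num > max_:
--         return False
--
--     digit_list = [int(i) for i in str(num)]
--
--     if len(digit_list) != 6:
--         return False
--
--     adjacent_same = False
--
--     for i in range(5):
--         if digit_list[i + 1] < digit_list[i]:
--             return False
--
--         if digit_list[i + 1] == digit_list[i]:
--             adjacent_same = True
--
--     return adjacent_same
-- ===== SOURCE B (Python) =====
-- def meets_criteria(num, min_, max_):
--     if num < min_: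
--         return False
--
--     if num > max_:
--         return False
--
--     digit_list = [int(i) for i in str(num)]
--
--     if len(digit_list) != 6:
--         return False
--
--     nondecreasing = digit_list == sorted(digit_list)
--     has_pair = any(digit_list[i] == digit_list[i + 1] for i in range(5))
--     return nondecreasing and has_pair
-- ===== Notes on version B (the rewrite author's own statement) =====
-- stated objective: alternative
-- what changed: The fused early-return scan with an adjacent_same flag is replaced by two independent passes: monotonicity via digit_list == sorted(digit_list) and the adjacent-pair condition via any() over index pairs.
import Mathlib
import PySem

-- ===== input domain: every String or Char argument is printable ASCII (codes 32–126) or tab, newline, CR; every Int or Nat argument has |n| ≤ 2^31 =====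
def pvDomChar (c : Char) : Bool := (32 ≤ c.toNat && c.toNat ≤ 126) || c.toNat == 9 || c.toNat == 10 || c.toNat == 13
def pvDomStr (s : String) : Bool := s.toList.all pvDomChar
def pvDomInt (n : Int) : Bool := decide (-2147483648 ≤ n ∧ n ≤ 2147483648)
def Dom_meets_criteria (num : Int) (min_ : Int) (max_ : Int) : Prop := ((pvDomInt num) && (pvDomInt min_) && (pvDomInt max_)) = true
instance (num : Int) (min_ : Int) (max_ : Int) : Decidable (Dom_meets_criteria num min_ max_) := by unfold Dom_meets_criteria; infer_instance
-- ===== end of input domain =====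

-- B replaces A's fused early-return scan by two separate passes (sorted-comparison + any over adjacent pairs); alternative decomposition, same cost.


-- ===== PORT A =====
-- [int(i) for i in str(num)]; exact whenever every character of str(num) is a digit
-- (i.e. 0 ≤ num, guaranteed by Pre_; int('-') raises ValueError, excluded by Pre_).
def pvDigits (num : Int) : List Int :=
  (PySem.Int.toChars num).map (fun c => (PySem.Int.ofChars? [c]).getD 0)

-- the 'for i in range(5)' loop with early return and the adjacent_same flag
def pvLoopA (ds : List Int) : Bool → List Int → Bool
  | adj, [] => adj
  | adj, i :: rest =>
    if PySem.List.pyGetD ds (i + 1) 0 < PySem.List.pyGetD ds i 0 then false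
    else pvLoopA ds
      (if PySem.List.pyGetD ds (i + 1) 0 == PySem.List.pyGetD ds i 0 then true else adj) rest

def meets_criteria (num : Int) (min_ : Int) (max_ : Int) : Bool :=
  if num < min_ then false
  else if num > max_ then false
  else
    let digit_list := pvDigits num
    if digit_list.length ≠ 6 then false
    else pvLoopA digit_list false (PySem.List.pyRange 0 5 1)

-- ===== PORT B =====
def meets_criteria_alt (num : Int) (min_ : Int) (max_ : Int) : Bool :=
  if num < min_ then false
  else if num > max_ then false
  else
    let digit_list := pvDigits num
    if digit_list.length ≠ 6 then false
    else
      let nondecreasing := decide (digit_list = PySem.List.sorted digit_list (fun x => x) false)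
      let has_pair := (PySem.List.pyRange 0 5 1).any
        (fun i => PySem.List.pyGetD digit_list i 0 == PySem.List.pyGetD digit_list (i + 1) 0)
      nondecreasing && has_pair

-- ===== PRECONDITION & SPEC =====
-- Pre_ excludes exactly the inputs where A raises ValueError: a NEGATIVE num inside
-- [min_, max_], where int('-') on the sign character of str(num) raises (B raises identically).
def Pre_meets_criteria (num : Int) (min_ : Int) (max_ : Int) : Prop :=
  num < min_ ∨ num > max_ ∨ 0 ≤ num
instance (num : Int) (min_ : Int) (max_ : Int) : Decidable (Pre_meets_criteria num min_ max_) := by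
  unfold Pre_meets_criteria; infer_instance

def pvWitness_meets_criteria : Int × Int × Int := (111123, 100000, 999999)

def Spec_meets_criteria (num : Int) (min_ : Int) (max_ : Int) (out : Bool) : Prop := out = meets_criteria_alt num min_ max_
instance (num : Int) (min_ : Int) (max_ : Int) (out : Bool) : Decidable (Spec_meets_criteria num min_ max_ out) := by unfold Spec_meets_criteria; infer_instance

-- ===== CLAIM (what is proved, stated in full; the proofs are below) =====
def Claim_equal_meets_criteria : Prop := ∀ (num : Int) (min_ : Int) (max_ : Int), Dom_meets_criteria num min_ max_ → Pre_meets_criteria num min_ max_ → Spec_meets_criteria num min_ max_ (meets_criteria num min_ max_)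

-- ===== LEMMAS AND PROOFS =====

-- digit_list == sorted(digit_list) is exactly adjacent non-decrease
lemma pv_beq_sorted_iff (ds : List Int) :
    (ds = PySem.List.sorted ds (fun x => x) false) ↔ ds.Pairwise (· ≤ ·) := by
  constructor
  · intro h
    have := PySem.List.sorted_pairwise (xs := ds) (key := fun x => x)
    rw [← h] at this
    exact this
  · intro h
    exact (PySem.List.sorted_eq_self_of_pairwise ds (fun x => x) h).symm

-- on any 6-element digit list the two passes of B compute A's fused loop
lemma pv_loop_eq (ds : List Int) (h6 : ds.length = 6) :
    pvLoopA ds false (PySem.List.pyRange 0 5 1) =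
      (decide (ds = PySem.List.sorted ds (fun x => x) false) &&
        (PySem.List.pyRange 0 5 1).any
          (fun i => PySem.List.pyGetD ds i 0 == PySem.List.pyGetD ds (i + 1) 0)) := by
  match ds, h6 with
  | [a, b, c, d, e, f], _ =>
    rw [show (decide ([a,b,c,d,e,f] = PySem.List.sorted [a,b,c,d,e,f] (fun x => x) false)) =
        decide (List.Pairwise (· ≤ ·) [a,b,c,d,e,f]) from by
      simp [pv_beq_sorted_iff]]
    rw [show PySem.List.pyRange 0 5 1 = [0,1,2,3,4] from by decide]
    rw [Bool.eq_iff_iff]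
    simp [pvLoopA, PySem.List.pyGetD, PySem.List.pyGet?, PySem.List.pyIdx?, List.pairwise_cons]
    omega

theorem meets_criteria_spec : Claim_equal_meets_criteria := by
  intro num min_ max_ _ _
  unfold Spec_meets_criteria meets_criteria meets_criteria_alt
  by_cases h1 : num < min_
  · simp [h1]
  · by_cases h2 : num > max_
    · simp [h1, h2]
    · by_cases h3 : (pvDigits num).length ≠ 6
      · simp [h1, h2, h3]
      · push Not at h3
        simp only [h1, h2, h3, if_false, ne_eq, not_true_eq_false]
        simp [pv_loop_eq _ h3]
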